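-- pv_equiv track=rewrite | github.com/jooyounghan/baekjun_study | dfs_bfs_backtracking/python/b1058.py | bfs
-- ===== SOURCE A (Python) =====
-- def bfs(connections, N):
--     max_num = 0
--     for person in range(N):
--         temp_num = 0
--         visited = [0] * N
--         check_queue = [0] * N
--         front = 0
--         rear = 1
--         check_queue[0] = person
--         visited[person] = 1
--         while front < rear:
--             check = check_queue[front]
--             front += 1
--             if visited[check] > 1:
--                 temp_num += 1
--                 if visited[check] == 3:
--                     continue
--             for connection in connections[check]:
--                 if not visited[connection]:
--                     check_queue[rear] = connection
--                     rear += 1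
--                     visited[connection] = visited[check] + 1
--         if temp_num > max_num:
--             max_num = temp_num
--     return max_num
-- ===== SOURCE B (Python) =====
-- def bfs(connections, N):
--     max_num = 0
--     for person in range(N):
--         reach = set(connections[person])
--         for friend in connections[person]:
--             reach.update(connections[friend])
--         reach.discard(person)
--         if len(reach) > max_num:
--             max_num = len(reach)
--     return max_num
-- ===== Notes on version B (the rewrite author's own statement) =====
-- stated objective: simpler
-- what changed: Replaces the manual fixed-size array queue with front/rear indices and distance-coloring BFS by a direct two-level set union per person (friends plus friends-of-friends, discarding self).
-- outside the precondition, e.g. on bfs([[-1], [0]], 2): A returns 1, B returns 2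
import Mathlib
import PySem

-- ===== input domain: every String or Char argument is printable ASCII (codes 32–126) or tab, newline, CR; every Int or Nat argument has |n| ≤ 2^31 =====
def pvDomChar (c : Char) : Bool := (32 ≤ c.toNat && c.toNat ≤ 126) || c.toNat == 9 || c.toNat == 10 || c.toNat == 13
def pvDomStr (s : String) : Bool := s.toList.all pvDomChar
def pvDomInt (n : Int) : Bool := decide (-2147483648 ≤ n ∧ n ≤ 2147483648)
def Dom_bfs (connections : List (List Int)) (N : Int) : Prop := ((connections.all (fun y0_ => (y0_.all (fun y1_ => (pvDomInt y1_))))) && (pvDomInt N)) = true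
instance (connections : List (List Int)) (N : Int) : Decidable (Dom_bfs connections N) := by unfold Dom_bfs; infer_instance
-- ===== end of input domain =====

-- B replaces A's array-queue, front/rear-index, distance-coloring BFS by a per-person
-- two-level set union (friends plus friends-of-friends, discarding self); objective: simpler.

-- ===== PORT A =====
-- the inner 'for connection in connections[check]' loop of A
def bfsExpand (connections : List (List Int)) (check : Int)
    (st : List Int × Int × List Int) : List Int × Int × List Int :=
  (PySem.List.pyGetD connections check []).foldl
    (fun st c =>
      if PySem.List.pyGetD st.2.2 c 0 = 0 then
        (PySem.List.pySetD st.1 st.2.1 c, st.2.1 + 1,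
         PySem.List.pySetD st.2.2 c (PySem.List.pyGetD st.2.2 check 0 + 1))
      else st) st

-- the 'while front < rear' loop of A (the fuel only makes the recursion structural;
-- under Pre_ the loop runs at most N times, so fuel N+1 is never exhausted)
def bfsLoop (connections : List (List Int)) :
    Nat → List Int → Int → Int → List Int → Int → Int
  | 0, _, _, _, _, temp => temp
  | fuel+1, cq, front, rear, v, temp =>
    if front < rear then
      let check := PySem.List.pyGetD cq front 0
      if 1 < PySem.List.pyGetD v check 0 then
        if PySem.List.pyGetD v check 0 = 3 then
          bfsLoop connections fuel cq (front + 1) rear v (temp + 1)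
        else
          let st := bfsExpand connections check (cq, rear, v)
          bfsLoop connections fuel st.1 (front + 1) st.2.1 st.2.2 (temp + 1)
      else
        let st := bfsExpand connections check (cq, rear, v)
        bfsLoop connections fuel st.1 (front + 1) st.2.1 st.2.2 temp
    else temp

def bfs (connections : List (List Int)) (N : Int) : Int :=
  (PySem.List.pyRange 0 N 1).foldl
    (fun max_num person =>
      let visited := PySem.List.pySetD (List.replicate N.toNat (0:Int)) person 1
      let cq := PySem.List.pySetD (List.replicate N.toNat (0:Int)) 0 person
      let temp := bfsLoop connections (N.toNat + 1) cq 0 1 visited 0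
      if max_num < temp then temp else max_num) 0

-- ===== PORT B =====
def bfs_alt (connections : List (List Int)) (N : Int) : Int :=
  (PySem.List.pyRange 0 N 1).foldl
    (fun max_num person =>
      let fr := PySem.List.pyGetD connections person []
      let reach := fr.foldl
        (fun s f => PySem.Set.update s (PySem.List.pyGetD connections f []))
        (PySem.Set.ofList fr)
      let reach := PySem.Set.discard reach person
      if max_num < PySem.Set.len reach then PySem.Set.len reach else max_num) 0

-- ===== PRECONDITION & SPEC =====
-- Pre_ excludes inputs where N exceeds the number of adjacency lists or some friend id in the
-- first N lists is negative or ≥ N: there A raises IndexError or silently wraps negative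
-- indices (Python negative indexing), while B treats the ids as plain labels.
def Pre_bfs (connections : List (List Int)) (N : Int) : Prop :=
  N ≤ connections.length ∧
    ∀ l ∈ connections.take N.toNat, ∀ c ∈ l, 0 ≤ c ∧ c < N
instance (connections : List (List Int)) (N : Int) : Decidable (Pre_bfs connections N) := by
  unfold Pre_bfs; infer_instance

def pvWitness_bfs : List (List Int) × Int := ([[1], [0, 1]], 2)

def Spec_bfs (connections : List (List Int)) (N : Int) (out : Int) : Prop :=
  out = bfs_alt connections N
instance (connections : List (List Int)) (N : Int) (out : Int) : Decidable (Spec_bfs connections N out) := by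
  unfold Spec_bfs; infer_instance

-- ===== CLAIM (what is proved, stated in full; the proofs are below) =====
def Claim_equal_bfs : Prop := ∀ (connections : List (List Int)) (N : Int),
  Dom_bfs connections N → Pre_bfs connections N → Spec_bfs connections N (bfs connections N)

-- ===== LEMMAS AND PROOFS =====

-- neighbour list of x (connections[x] for 0 ≤ x < len)
abbrev nbr (connections : List (List Int)) (x : Int) : List Int :=
  PySem.List.pyGetD connections x []
-- visited value of x
abbrev vget (v : List Int) (x : Int) : Int := PySem.List.pyGetD v x 0

theorem vget_setD_self (v : List Int) (c w : Int) (hc : 0 ≤ c) (hlt : c.toNat < v.length) :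
    vget (PySem.List.pySetD v c w) c = w := by
  show PySem.List.pyGetD _ _ _ = w
  rw [show c = ((c.toNat : ℕ) : ℤ) by omega, PySem.List.pySetD_natCast,
    PySem.List.pyGetD_natCast]
  simp [List.getD, hlt]

theorem vget_setD_ne (v : List Int) (c w x : Int) (hc : 0 ≤ c) (hx : 0 ≤ x) (hne : x ≠ c) :
    vget (PySem.List.pySetD v c w) x = vget v x := by
  show PySem.List.pyGetD _ _ _ = PySem.List.pyGetD _ _ _
  rw [PySem.List.pySetD_of_nonneg v w hc]
  rw [show x = ((x.toNat : ℕ) : ℤ) by omega]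
  rw [PySem.List.pyGetD_natCast, PySem.List.pyGetD_natCast]
  simp only [List.getD]
  rw [List.getElem?_set_ne (by omega : c.toNat ≠ x.toNat)]

theorem length_setD (v : List Int) (c w : Int) :
    (PySem.List.pySetD v c w).length = v.length := PySem.List.length_pySetD ..

def newNodes (w : Int) (v : List Int) : List Int → List Int
  | [] => []
  | c :: cs =>
    if vget v c = 0 then c :: newNodes w (PySem.List.pySetD v c w) cs
    else newNodes w v cs

def markAll (w : Int) (v : List Int) : List Int → List Int
  | [] => v
  | c :: cs => markAll w (PySem.List.pySetD v c w) cs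

def writeSeq (cq : List Int) (r : Int) : List Int → List Int
  | [] => cq
  | x :: xs => writeSeq (PySem.List.pySetD cq r x) (r + 1) xs

theorem length_markAll (w : Int) (v : List Int) (nl : List Int) :
    (markAll w v nl).length = v.length := by
  induction nl generalizing v with
  | nil => rfl
  | cons c cs ih => simp [markAll, ih, length_setD]

theorem length_writeSeq (cq : List Int) (r : Int) (xs : List Int) :
    (writeSeq cq r xs).length = cq.length := by
  induction xs generalizing cq r with
  | nil => rfl
  | cons x xs ih => simp [writeSeq, ih, length_setD]

theorem vget_markAll_of_not_mem (w : Int) (v : List Int) (nl : List Int) (x : Int)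
    (hx : 0 ≤ x) (hmem : x ∉ nl) (hc : ∀ c ∈ nl, 0 ≤ c) :
    vget (markAll w v nl) x = vget v x := by
  induction nl generalizing v with
  | nil => rfl
  | cons c cs ih =>
    simp only [markAll]
    rw [ih _ (by simp at hmem; exact hmem.2) (fun c hc' => hc c (by simp [hc']))]
    exact vget_setD_ne v c w x (hc c (by simp)) hx (by simp at hmem; exact hmem.1)

theorem vget_markAll_of_mem (w : Int) (v : List Int) (nl : List Int) (x : Int)
    (hx : x ∈ nl) (hc : ∀ c ∈ nl, 0 ≤ c ∧ c.toNat < v.length) :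
    vget (markAll w v nl) x = w := by
  induction nl generalizing v with
  | nil => simp at hx
  | cons c cs ih =>
    simp only [markAll]
    by_cases hxc : x ∈ cs
    · exact ih _ hxc (fun c' h' => by
        have := hc c' (by simp [h']); simpa [length_setD] using this)
    · have hx' : x = c := by simp at hx; tauto
      subst hx'
      rw [vget_markAll_of_not_mem w _ cs x (hc x (by simp)).1 hxc
        (fun c' h' => (hc c' (by simp [h'])).1)]
      exact vget_setD_self v x w (hc x (by simp)).1 (hc x (by simp)).2

theorem mem_newNodes (w : Int) (hw : w ≠ 0) (v : List Int) (ns : List Int) (x : Int)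
    (hns : ∀ c ∈ ns, 0 ≤ c) :
    x ∈ newNodes w v ns ↔ x ∈ ns ∧ vget v x = 0 := by
  induction ns generalizing v with
  | nil => simp [newNodes]
  | cons c cs ih =>
    simp only [newNodes]
    by_cases hxc : x = c
    · subst hxc
      split_ifs with h0
      · simp [h0]
      · rw [ih v (fun c' h' => hns c' (by simp [h']))]
        simp [h0]
    · split_ifs with h0
      · simp only [List.mem_cons, hxc, false_or]
        rw [ih _ (fun c' h' => hns c' (by simp [h']))]
        by_cases hxcs : x ∈ cs
        · have hxnn : 0 ≤ x := hns x (by simp [hxcs])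
          rw [vget_setD_ne v c w x (hns c (by simp)) hxnn hxc]
        · simp [hxcs]
      · rw [ih v (fun c' h' => hns c' (by simp [h']))]
        constructor
        · rintro ⟨h1, h2⟩; exact ⟨by simp [h1], h2⟩
        · rintro ⟨h1, h2⟩
          refine ⟨?_, h2⟩
          rcases List.mem_cons.1 h1 with h | h
          · exact absurd h hxc
          · exact h

theorem nodup_newNodes (w : Int) (hw : w ≠ 0) (v : List Int) (ns : List Int)
    (hns : ∀ c ∈ ns, 0 ≤ c ∧ c.toNat < v.length) :
    (newNodes w v ns).Nodup := by
  induction ns generalizing v with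
  | nil => simp [newNodes]
  | cons c cs ih =>
    simp only [newNodes]
    split_ifs with h0
    · refine List.nodup_cons.2 ⟨?_, ih _ (fun c' h' => by
        have := hns c' (by simp [h']); simpa [length_setD] using this)⟩
      intro hmem
      have := (mem_newNodes w hw _ cs c
        (fun c' h' => (hns c' (by simp [h'])).1)).1 hmem
      have hset := vget_setD_self v c w (hns c (by simp)).1 (hns c (by simp)).2
      rw [hset] at this
      exact hw this.2
    · exact ih v (fun c' h' => hns c' (by simp [h']))

theorem toFinset_newNodes (w : Int) (hw : w ≠ 0) (v : List Int) (ns : List Int)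
    (hns : ∀ c ∈ ns, 0 ≤ c) :
    (newNodes w v ns).toFinset = ns.toFinset.filter (fun x => vget v x = 0) := by
  ext x
  simp [mem_newNodes w hw v ns x hns, and_comm]

theorem length_newNodes (w : Int) (hw : w ≠ 0) (v : List Int) (ns : List Int)
    (hns : ∀ c ∈ ns, 0 ≤ c ∧ c.toNat < v.length) :
    ((newNodes w v ns).length : Int)
      = ((ns.toFinset.filter (fun x => vget v x = 0)).card : Int) := by
  rw [← toFinset_newNodes w hw v ns (fun c h => (hns c h).1),
    List.toFinset_card_of_nodup (nodup_newNodes w hw v ns hns)]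

def Zf (v : List Int) : Finset ℕ :=
  (Finset.range v.length).filter (fun i => vget v (i : Int) ≠ 0)

theorem Zf_card_le (v : List Int) : (Zf v).card ≤ v.length := by
  calc (Zf v).card ≤ (Finset.range v.length).card := Finset.card_filter_le _ _
    _ = v.length := Finset.card_range _

theorem Zf_setD_fresh (v : List Int) (c w : Int) (hc : 0 ≤ c) (hlt : c.toNat < v.length)
    (h0 : vget v c = 0) (hw : w ≠ 0) :
    Zf (PySem.List.pySetD v c w) = insert c.toNat (Zf v) ∧ c.toNat ∉ Zf v := by
  constructor
  · ext i
    simp only [Zf, Finset.mem_filter, Finset.mem_range, Finset.mem_insert, length_setD]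
    by_cases hic : i = c.toNat
    · subst hic
      have hv : vget (PySem.List.pySetD v c w) ((c.toNat : ℕ) : ℤ) = w := by
        rw [show ((c.toNat:ℕ):ℤ) = c by omega]
        exact vget_setD_self v c w hc hlt
      exact ⟨fun _ => Or.inl rfl, fun _ => ⟨hlt, by rw [hv]; exact hw⟩⟩
    · have : vget (PySem.List.pySetD v c w) (i:Int) = vget v (i:Int) := by
        apply vget_setD_ne v c w _ hc (by positivity)
        omega
      simp [this, hic]
  · simp only [Zf, Finset.mem_filter, Finset.mem_range, not_and]
    intro _
    rw [show ((c.toNat:ℕ):ℤ) = c by omega]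
    simp [h0]

theorem Zf_markAll (w : Int) (hw : w ≠ 0) (v : List Int) (nl : List Int)
    (hnl : ∀ c ∈ nl, 0 ≤ c ∧ c.toNat < v.length ∧ vget v c = 0) (hnd : nl.Nodup) :
    (Zf (markAll w v nl)).card = (Zf v).card + nl.length := by
  induction nl generalizing v with
  | nil => simp [markAll]
  | cons c cs ih =>
    simp only [markAll]
    have hc := hnl c (by simp)
    obtain ⟨hz, hnot⟩ := Zf_setD_fresh v c w hc.1 hc.2.1 hc.2.2 hw
    rw [ih _ ?_ (List.nodup_cons.1 hnd).2]
    · rw [hz, Finset.card_insert_of_notMem hnot]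
      simp; omega
    · intro c' h'
      have h1 := hnl c' (by simp [h'])
      refine ⟨h1.1, by simpa [length_setD] using h1.2.1, ?_⟩
      rw [vget_setD_ne v c w c' hc.1 h1.1]
      · exact h1.2.2
      · intro hcc; exact (List.nodup_cons.1 hnd).1 (hcc ▸ h')

def extra (connections : List (List Int)) (v : List Int) : List Int → Int
  | [] => 0
  | f :: fs =>
    let nl := newNodes 3 v (nbr connections f)
    (nl.length : Int) + extra connections (markAll 3 v nl) fs

theorem card_union_filter (A S : Finset ℤ) (p : ℤ → Prop) [DecidablePred p] :
    ((A ∪ S).filter p).card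
      = (A.filter p).card + (S.filter (fun x => p x ∧ x ∉ A)).card := by
  rw [show (A ∪ S).filter p = A.filter p ∪ S.filter (fun x => p x ∧ x ∉ A) by
    ext x; simp; tauto]
  apply Finset.card_union_of_disjoint
  rw [Finset.disjoint_left]
  intro a ha hb
  simp at ha hb
  tauto

theorem extra_eq (conn : List (List Int)) (v : List Int) (fs : List Int)
    (hfs : ∀ f ∈ fs, ∀ c ∈ nbr conn f, 0 ≤ c ∧ c.toNat < v.length) :
    extra conn v fs
      = (((fs.toFinset.biUnion (fun f => (nbr conn f).toFinset)).filter
          (fun x => vget v x = 0)).card : Int) := by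
  induction fs generalizing v with
  | nil => simp [extra]
  | cons f fs ih =>
    simp only [extra]
    have hbound := hfs f (by simp)
    have hnl := length_newNodes 3 (by norm_num) v (nbr conn f) hbound
    set nl := newNodes 3 v (nbr conn f) with hnldef
    have hnlmem : ∀ x, x ∈ nl ↔ x ∈ nbr conn f ∧ vget v x = 0 := fun x =>
      mem_newNodes 3 (by norm_num) v (nbr conn f) x (fun c h => (hbound c h).1)
    have hlen' : (markAll 3 v nl).length = v.length := length_markAll ..
    rw [ih (markAll 3 v nl) (fun f' h' c hc => by
      have := hfs f' (by simp [h']) c hc; exact ⟨this.1, by rw [hlen']; exact this.2⟩)]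
    have hcongr : (fs.toFinset.biUnion (fun f' => (nbr conn f').toFinset)).filter
          (fun x => vget (markAll 3 v nl) x = 0)
        = (fs.toFinset.biUnion (fun f' => (nbr conn f').toFinset)).filter
          (fun x => vget v x = 0 ∧ x ∉ (nbr conn f).toFinset) := by
      apply Finset.filter_congr
      intro x hx
      obtain ⟨f', hf', hxf'⟩ := Finset.mem_biUnion.1 hx
      rw [List.mem_toFinset] at hxf'
      have hx0 : 0 ≤ x := (hfs f' (List.mem_cons_of_mem f (by simpa using hf')) x hxf').1
      by_cases hmem : x ∈ nl
      · have h3 : vget (markAll 3 v nl) x = 3 :=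
          vget_markAll_of_mem 3 v nl x hmem (fun c hc =>
            ⟨(hbound c ((hnlmem c).1 hc).1).1, (hbound c ((hnlmem c).1 hc).1).2⟩)
        have := (hnlmem x).1 hmem
        simp [h3, List.mem_toFinset, this.1]
      · rw [vget_markAll_of_not_mem 3 v nl x hx0 hmem
          (fun c hc => (hbound c ((hnlmem c).1 hc).1).1)]
        rw [List.mem_toFinset]
        constructor
        · intro h; exact ⟨h, fun hA => hmem ((hnlmem x).2 ⟨hA, h⟩)⟩
        · intro h; exact h.1
    rw [hcongr]
    rw [List.toFinset_cons, Finset.biUnion_insert]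
    rw [card_union_filter ((nbr conn f).toFinset) _ (fun x => vget v x = 0)]
    rw [hnl]
    push_cast
    ring

theorem expand_fold_eq (check w0 : Int) (hw0 : 0 < w0) :
    ∀ (ns : List Int) (cq v : List Int) (rear : Int),
    (∀ c ∈ ns, 0 ≤ c) → 0 ≤ check → vget v check = w0 →
    ns.foldl
      (fun (st : List Int × Int × List Int) c =>
        if PySem.List.pyGetD st.2.2 c 0 = 0 then
          (PySem.List.pySetD st.1 st.2.1 c, st.2.1 + 1,
           PySem.List.pySetD st.2.2 c (PySem.List.pyGetD st.2.2 check 0 + 1))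
        else st) (cq, rear, v)
      = (writeSeq cq rear (newNodes (w0+1) v ns),
         rear + (newNodes (w0+1) v ns).length,
         markAll (w0+1) v (newNodes (w0+1) v ns)) := by
  intro ns
  induction ns with
  | nil => intro cq v rear _ _ _; simp [newNodes, writeSeq, markAll]
  | cons c cs ih =>
    intro cq v rear hns hcheck hv
    simp only [List.foldl_cons, newNodes]
    by_cases h0 : vget v c = 0
    · have hcc : check ≠ c := fun h => by rw [← h, hv] at h0; omega
      rw [if_pos h0, show PySem.List.pyGetD v check 0 = w0 from hv]
      simp only [if_pos h0]
      rw [ih _ _ _ (fun c' h' => hns c' (by simp [h'])) hcheck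
        (by rw [vget_setD_ne v c _ check (hns c (by simp)) hcheck hcc]; exact hv)]
      simp only [newNodes, if_pos h0, writeSeq, markAll, Prod.mk.injEq]
      refine ⟨trivial, ?_, trivial⟩
      simp; omega
    · rw [if_neg h0]
      simp only [if_neg h0]
      exact ih _ _ _ (fun c' h' => hns c' (by simp [h'])) hcheck hv

theorem bfsExpand_eq (connections : List (List Int)) (check : Int) (cq v : List Int)
    (rear : Int) (hcheck : 0 ≤ check) (hv : 0 < vget v check)
    (hns : ∀ c ∈ PySem.List.pyGetD connections check [], 0 ≤ c) :
    bfsExpand connections check (cq, rear, v)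
      = (writeSeq cq rear (newNodes (vget v check + 1) v (PySem.List.pyGetD connections check [])),
         rear + (newNodes (vget v check + 1) v (PySem.List.pyGetD connections check [])).length,
         markAll (vget v check + 1) v (newNodes (vget v check + 1) v (PySem.List.pyGetD connections check []))) := by
  exact expand_fold_eq check (vget v check) hv _ cq v rear hns hcheck rfl

theorem pyGetD_writeSeq_lt (cq : List Int) (r i : Int) (xs : List Int)
    (hi : 0 ≤ i) (hir : i < r) :
    PySem.List.pyGetD (writeSeq cq r xs) i 0 = PySem.List.pyGetD cq i 0 := by
  induction xs generalizing cq r with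
  | nil => rfl
  | cons x xs ih =>
    simp only [writeSeq]
    rw [ih _ _ (by omega)]
    exact vget_setD_ne cq r x i (by omega) hi (by omega)

theorem pyGetD_writeSeq_at (cq : List Int) (r : Int) (xs : List Int) (k : Nat)
    (hk : k < xs.length) (hr : 0 ≤ r) (hfit : r.toNat + xs.length ≤ cq.length) :
    PySem.List.pyGetD (writeSeq cq r xs) (r + k) 0 = xs.getD k 0 := by
  induction xs generalizing cq r k with
  | nil => simp at hk
  | cons x xs ih =>
    simp only [writeSeq]
    match k with
    | 0 =>
      rw [show r + ((0:Nat):Int) = r by simp]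
      rw [pyGetD_writeSeq_lt _ (r+1) r xs hr (by omega)]
      exact vget_setD_self cq r x hr (by simp at hfit ⊢; omega)
    | k+1 =>
      have := ih (PySem.List.pySetD cq r x) (r+1) k (by simpa using hk)
        (by omega) (by simp [length_setD] at hfit ⊢; omega)
      rw [show r + ((k+1:Nat):Int) = (r+1) + (k:Nat) by push_cast; ring]
      rw [this]
      simp

theorem loop_spec (conn : List (List Int)) (n : Nat)
    (hconn : ∀ x : Int, 0 ≤ x → x < (n:Int) → ∀ c ∈ nbr conn x, 0 ≤ c ∧ c < (n:Int)) :
    ∀ (fuel : Nat) (cq v : List Int) (front temp : Int) (P : List Int),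
    v.length = n → cq.length = n → 0 ≤ front →
    (n:Int) ≤ front + fuel →
    front + P.length = ((Zf v).card : Int) →
    (∀ (j : Nat), j < P.length → PySem.List.pyGetD cq (front + (j:Int)) 0 = P.getD j 0) →
    (∀ x ∈ P, 0 ≤ x ∧ x < (n:Int) ∧ (vget v x = 2 ∨ vget v x = 3)) →
    P.Nodup →
    bfsLoop conn fuel cq front (front + P.length) v temp
      = temp + P.length + extra conn v (P.filter (fun x => vget v x = 2)) := by
  intro fuel
  induction fuel with
  | zero =>
    intro cq v front temp P hv hcq hf hfuel hz hpend hvals hnd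
    have hle : ((Zf v).card : Int) ≤ n := by
      have := Zf_card_le v; omega
    have : P = [] := by
      have : P.length = 0 := by omega
      exact List.length_eq_zero_iff.1 this
    subst this
    simp [bfsLoop, extra]
  | succ fuel ih =>
    intro cq v front temp P hv hcq hf hfuel hz hpend hvals hnd
    match P with
    | [] => simp [bfsLoop, extra]
    | c :: rest =>
      have hlen : ((c :: rest).length : Int) = (rest.length : Int) + 1 := by
        simp
      have hfr : front < front + ((c :: rest).length : Int) := by omega
      have hcheck : PySem.List.pyGetD cq front 0 = c := by
        have := hpend 0 (by simp)
        simpa using this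
      have hcv := hvals c (by simp)
      obtain ⟨hc0, hcn, hv23⟩ := hcv
      rcases hv23 with h2 | h3
      case inr =>
        -- level-3 node: count it, do not expand
        simp only [bfsLoop, if_pos hfr, hcheck]
        rw [show PySem.List.pyGetD v c 0 = 3 from h3]
        rw [if_pos (by omega : (1:ℤ) < 3), if_pos rfl]
        have harith : front + ((c :: rest).length : Int) = (front + 1) + rest.length := by
          omega
        rw [harith]
        rw [ih cq v (front + 1) (temp + 1) rest hv hcq (by omega) (by push_cast at hfuel ⊢; omega)
          (by push_cast at hz ⊢; omega)
          (fun j hj => by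
            have h := hpend (j+1) (by simp; omega)
            push_cast at h
            rw [List.getD_cons_succ] at h
            rw [show front + 1 + (j:Int) = front + ((j:Int)+1) by ring]
            exact h)
          (fun x hx => hvals x (by simp [hx]))
          (List.nodup_cons.1 hnd).2]
        have hfilter : (c :: rest).filter (fun x => vget v x = 2)
            = rest.filter (fun x => vget v x = 2) := by
          simp [List.filter_cons, h3]
        rw [hfilter]
        push_cast
        omega
      case inl =>
        -- level-2 node: count it and expand
        simp only [bfsLoop, if_pos hfr, hcheck]
        rw [show PySem.List.pyGetD v c 0 = 2 from h2]
        rw [if_pos (by omega : (1:ℤ) < 2), if_neg (by omega : ¬(2:ℤ) = 3)]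
        rw [bfsExpand_eq conn c cq v _ hc0 (by rw [h2]; omega)
          (fun c' h' => (hconn c hc0 hcn c' h').1)]
        rw [show vget v c + 1 = 3 by rw [h2]; norm_num]
        set nl := newNodes 3 v (nbr conn c) with hnldef
        have hnbrb : ∀ c' ∈ nbr conn c, 0 ≤ c' ∧ c' < (n:Int) := hconn c hc0 hcn
        have hnlmem : ∀ x, x ∈ nl ↔ x ∈ nbr conn c ∧ vget v x = 0 := fun x =>
          mem_newNodes 3 (by norm_num) v (nbr conn c) x (fun c' h' => (hnbrb c' h').1)
        have hnlbound : ∀ x ∈ nl, 0 ≤ x ∧ x.toNat < v.length := by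
          intro x hx
          have h' := hnbrb x ((hnlmem x).1 hx).1
          exact ⟨h'.1, by omega⟩
        have hnlnodup : nl.Nodup := nodup_newNodes 3 (by norm_num) v (nbr conn c)
          (fun c' h' => ⟨(hnbrb c' h').1, by have := (hnbrb c' h').2; omega⟩)
        have hzmark : (Zf (markAll 3 v nl)).card = (Zf v).card + nl.length :=
          Zf_markAll 3 (by norm_num) v nl
            (fun x hx => ⟨(hnlbound x hx).1, (hnlbound x hx).2, ((hnlmem x).1 hx).2⟩)
            hnlnodup
        have hvlen' : (markAll 3 v nl).length = v.length := length_markAll ..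
        have hcqlen' : (writeSeq cq (front + ((c :: rest).length : Int)) nl).length = cq.length :=
          length_writeSeq ..
        have hrear : (0:Int) ≤ front + ((c :: rest).length : Int) := by omega
        have hfit : (front + ((c :: rest).length : Int)) + nl.length ≤ (n:Int) := by
          have h1 : (Zf (markAll 3 v nl)).card ≤ (markAll 3 v nl).length := Zf_card_le _
          rw [hvlen', hv] at h1
          omega
        -- values of v' on rest and nl
        have hrestval : ∀ x ∈ rest, vget (markAll 3 v nl) x = vget v x := by
          intro x hx
          have hxv := hvals x (by simp [hx])
          apply vget_markAll_of_not_mem 3 v nl x hxv.1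
          · intro hmem
            have := ((hnlmem x).1 hmem).2
            rcases hxv.2.2 with h | h <;> omega
          · exact fun c' h' => (hnlbound c' h').1
        have hnlval : ∀ x ∈ nl, vget (markAll 3 v nl) x = 3 := by
          intro x hx
          exact vget_markAll_of_mem 3 v nl x hx hnlbound
        have harith : front + ((c :: rest).length : Int)
            = (front + 1) + (rest.length : Int) := by omega
        -- apply the induction hypothesis to the new state
        have happly := ih
          (writeSeq cq (front + ((c :: rest).length : Int)) nl)
          (markAll 3 v nl) (front + 1) (temp + 1) (rest ++ nl)
          (by rw [hvlen', hv]) (by rw [hcqlen', hcq]) (by omega)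
          (by push_cast at hfuel ⊢; omega)
          (by
            rw [List.length_append, hzmark]
            push_cast at hz ⊢
            omega)
          (by
            intro j hj
            by_cases hjr : j < rest.length
            · rw [pyGetD_writeSeq_lt _ _ _ _ (by omega) (by push_cast; omega)]
              have h := hpend (j+1) (by simp; omega)
              push_cast at h
              rw [List.getD_cons_succ] at h
              rw [List.getD_append _ _ _ _ hjr]
              rw [show front + 1 + (j:Int) = front + ((j:Int)+1) by ring]
              exact h
            · have hk : j = rest.length + (j - rest.length) := by omega
              have hklt : j - rest.length < nl.length := by
                simp at hj; omega
              have hpos : front + 1 + (j:Int)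
                  = (front + ((c :: rest).length : Int)) + ((j - rest.length : Nat) : Int) := by
                push_cast
                omega
              rw [hpos, pyGetD_writeSeq_at _ _ _ _ hklt (by omega)
                (by rw [hcq]; push_cast at hfit ⊢; omega)]
              rw [List.getD_append_right _ _ _ _ (by omega)]
            )
          (by
            intro x hx
            rcases List.mem_append.1 hx with hx | hx
            · have hxv := hvals x (by simp [hx])
              exact ⟨hxv.1, hxv.2.1, by rw [hrestval x hx]; exact hxv.2.2⟩
            · have h' := hnbrb x ((hnlmem x).1 hx).1
              exact ⟨h'.1, h'.2, Or.inr (hnlval x hx)⟩)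
          (by
            rw [List.nodup_append]
            refine ⟨(List.nodup_cons.1 hnd).2, hnlnodup, ?_⟩
            intro x hx y hy hxy
            subst hxy
            have h0' := ((hnlmem x).1 hy).2
            have hxv := hvals x (by simp [hx])
            rcases hxv.2.2 with h | h <;> omega)
        rw [harith] at happly ⊢
        dsimp only
        rw [List.length_append] at happly
        push_cast at happly
        rw [show (front + 1) + ((rest.length:Int) + (nl.length:Int))
            = front + 1 + (rest.length:Int) + (nl.length:Int) from by ring] at happly
        rw [happly]
        -- filters
        have hf1 : rest.filter (fun x => vget (markAll 3 v nl) x = 2)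
            = rest.filter (fun x => vget v x = 2) :=
          List.filter_congr (fun x hx => by rw [hrestval x hx])
        have hf2 : nl.filter (fun x => vget (markAll 3 v nl) x = 2) = [] :=
          List.filter_eq_nil_iff.2 (fun x hx => by simp [hnlval x hx])
        have hfsplit : (rest ++ nl).filter (fun x => vget (markAll 3 v nl) x = 2)
            = rest.filter (fun x => vget v x = 2) := by
          rw [List.filter_append, hf1, hf2, List.append_nil]
        rw [hfsplit]
        have hfcons : (c :: rest).filter (fun x => vget v x = 2)
            = c :: rest.filter (fun x => vget v x = 2) := by
          simp [List.filter_cons, h2]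
        rw [hfcons]
        simp only [extra, ← hnldef]
        push_cast
        omega

def reachSet (connections : List (List Int)) (p : Int) : Finset ℤ :=
  ((nbr connections p).toFinset ∪
    (nbr connections p).toFinset.biUnion (fun f => (nbr connections f).toFinset)).erase p

theorem mem_foldl_update (g : Int → List Int) (l : List Int) (s : PySem.Set Int) (x : Int) :
    x ∈ l.foldl (fun s f => PySem.Set.update s (g f)) s ↔ x ∈ s ∨ ∃ f ∈ l, x ∈ g f := by
  induction l generalizing s with
  | nil => simp
  | cons f fs ih =>
    simp only [List.foldl_cons, ih, PySem.Set.mem_update]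
    constructor
    · rintro (( h | h) | ⟨f', hf', h⟩)
      · exact Or.inl h
      · exact Or.inr ⟨f, by simp, h⟩
      · exact Or.inr ⟨f', by simp [hf'], h⟩
    · rintro (h | ⟨f', hf', h⟩)
      · exact Or.inl (Or.inl h)
      · rcases List.mem_cons.1 hf' with rfl | hf'
        · exact Or.inl (Or.inr h)
        · exact Or.inr ⟨f', hf', h⟩

theorem nodup_foldl_update (g : Int → List Int) (l : List Int) (s : PySem.Set Int)
    (hs : s.Nodup) : (l.foldl (fun s f => PySem.Set.update s (g f)) s).Nodup := by
  induction l generalizing s with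
  | nil => exact hs
  | cons f fs ih => exact ih _ (PySem.Set.nodup_update _ _ hs)

theorem personB (conn : List (List Int)) (p : Int) :
    PySem.Set.len (PySem.Set.discard
      ((nbr conn p).foldl (fun s f => PySem.Set.update s (nbr conn f))
        (PySem.Set.ofList (nbr conn p))) p)
      = ((reachSet conn p).card : Int) := by
  set r := PySem.Set.discard
      ((nbr conn p).foldl (fun s f => PySem.Set.update s (nbr conn f))
        (PySem.Set.ofList (nbr conn p))) p with hr
  have hnd : r.Nodup :=
    PySem.Set.nodup_discard _ _ (nodup_foldl_update _ _ _ (PySem.Set.nodup_ofList _))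
  have hmem : ∀ x, x ∈ r ↔ (x ∈ nbr conn p ∨ ∃ f ∈ nbr conn p, x ∈ nbr conn f) ∧ x ≠ p := by
    intro x
    rw [hr, PySem.Set.mem_discard, mem_foldl_update, PySem.Set.mem_ofList]
  have hlen : PySem.Set.len r = (r.length : Int) := by
    simp [PySem.Set.len]
  rw [hlen, ← List.toFinset_card_of_nodup hnd]
  norm_cast
  congr 1
  ext x
  simp only [List.mem_toFinset, hmem, reachSet, Finset.mem_erase, Finset.mem_union,
    Finset.mem_biUnion, List.mem_toFinset]
  tauto

theorem vget_replicate (n : Nat) (x : Int) (hx : 0 ≤ x) :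
    vget (List.replicate n (0:Int)) x = 0 := by
  show PySem.List.pyGetD _ _ _ = 0
  rw [show x = ((x.toNat:ℕ):ℤ) by omega, PySem.List.pyGetD_natCast]
  simp only [List.getD, List.getElem?_replicate]
  split <;> rfl

theorem personA (conn : List (List Int)) (N : Int)
    (hconn : ∀ x : Int, 0 ≤ x → x < N → ∀ c ∈ nbr conn x, 0 ≤ c ∧ c < N)
    (p : Int) (hp : 0 ≤ p) (hpN : p < N) :
    bfsLoop conn (N.toNat + 1)
      (PySem.List.pySetD (List.replicate N.toNat (0:Int)) 0 p) 0 1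
      (PySem.List.pySetD (List.replicate N.toNat (0:Int)) p 1) 0
      = ((reachSet conn p).card : Int) := by
  set n := N.toNat with hn
  have hNn : ((n:ℕ):ℤ) = N := by omega
  have hn1 : 1 ≤ n := by omega
  have hpn : p.toNat < n := by omega
  set v0 := PySem.List.pySetD (List.replicate n (0:Int)) p 1 with hv0def
  set cq0 := PySem.List.pySetD (List.replicate n (0:Int)) 0 p with hcq0def
  have hv0len : v0.length = n := by simp [hv0def]
  have hcq0len : cq0.length = n := by simp [hcq0def]
  have hconn' : ∀ x : Int, 0 ≤ x → x < (n:Int) → ∀ c ∈ nbr conn x, 0 ≤ c ∧ c < (n:Int) := by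
    intro x hx hxn c hc
    have := hconn x hx (by omega) c hc
    omega
  have hv0 : ∀ x, 0 ≤ x → vget v0 x = if x = p then 1 else 0 := by
    intro x hx
    by_cases hxp : x = p
    · rw [if_pos hxp, hv0def, hxp]
      exact vget_setD_self _ p 1 hp (by simp; omega)
    · rw [if_neg hxp, hv0def]
      rw [vget_setD_ne _ p 1 x hp hx hxp]
      exact vget_replicate n x hx
  have hvp : vget v0 p = 1 := by rw [hv0 p hp]; simp
  have hZ0 : Zf v0 = {p.toNat} := by
    ext i
    simp only [Zf, Finset.mem_filter, Finset.mem_range, Finset.mem_singleton, hv0len]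
    constructor
    · rintro ⟨hi, hne⟩
      rw [hv0 (i:Int) (by positivity)] at hne
      by_cases h : ((i:ℕ):ℤ) = p
      · omega
      · simp [h] at hne
    · rintro rfl
      refine ⟨hpn, ?_⟩
      rw [hv0 ((p.toNat:ℕ):ℤ) (by positivity), if_pos (by omega)]
      norm_num
  have hcheck : PySem.List.pyGetD cq0 0 0 = p := by
    rw [hcq0def]
    exact vget_setD_self _ 0 p le_rfl (by simp; omega)
  -- the neighbour list of p and the level-1 layer
  have hpb : ∀ c ∈ nbr conn p, 0 ≤ c ∧ c < (n:Int) := hconn' p hp (by omega)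
  set L1 := newNodes 2 v0 (nbr conn p) with hL1def
  have hL1mem : ∀ x, x ∈ L1 ↔ x ∈ nbr conn p ∧ x ≠ p := by
    intro x
    rw [hL1def, mem_newNodes 2 (by norm_num) v0 (nbr conn p) x (fun c h => (hpb c h).1)]
    constructor
    · rintro ⟨h1, h2⟩
      refine ⟨h1, ?_⟩
      intro hxp; rw [hxp, hvp] at h2; omega
    · rintro ⟨h1, h2⟩
      refine ⟨h1, ?_⟩
      rw [hv0 x (hpb x h1).1, if_neg h2]
  have hL1bound : ∀ x ∈ L1, 0 ≤ x ∧ x.toNat < v0.length := by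
    intro x hx
    have := hpb x ((hL1mem x).1 hx).1
    exact ⟨this.1, by omega⟩
  have hL1nodup : L1.Nodup := nodup_newNodes 2 (by norm_num) v0 (nbr conn p)
    (fun c h => ⟨(hpb c h).1, by have := (hpb c h).2; omega⟩)
  set v1 := markAll 2 v0 L1 with hv1def
  have hv1len : v1.length = n := by rw [hv1def, length_markAll, hv0len]
  have hZ1 : (Zf v1).card = 1 + L1.length := by
    rw [hv1def, Zf_markAll 2 (by norm_num) v0 L1
      (fun x hx => ⟨(hL1bound x hx).1, (hL1bound x hx).2, by
        rw [hv0 x (hL1bound x hx).1, if_neg ((hL1mem x).1 hx).2]⟩) hL1nodup]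
    rw [hZ0]
    simp
  have hL1val : ∀ x ∈ L1, vget v1 x = 2 := fun x hx =>
    vget_markAll_of_mem 2 v0 L1 x hx hL1bound
  have hfit : 1 + (L1.length : Int) ≤ n := by
    have := Zf_card_le v1
    rw [hv1len] at this
    omega
  -- unfold the first iteration of the loop
  simp only [bfsLoop, if_pos (by omega : (0:ℤ) < 1), hcheck]
  rw [show PySem.List.pyGetD v0 p 0 = 1 from hvp]
  rw [if_neg (by omega : ¬(1:ℤ) < 1)]
  rw [bfsExpand_eq conn p cq0 v0 1 hp (by rw [hvp]; omega) (fun c h => (hpb c h).1)]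
  rw [show vget v0 p + 1 = 2 by rw [hvp]; norm_num]
  dsimp only
  rw [← hL1def, ← hv1def]
  -- run the main loop lemma
  rw [show (0:ℤ) + 1 = 1 by norm_num]
  rw [loop_spec conn n hconn' n (writeSeq cq0 1 L1) v1 1 0 L1
    hv1len (by rw [length_writeSeq, hcq0len]) (by omega) (by omega)
    (by rw [hZ1]; push_cast; ring)
    (fun j hj => by
      rw [pyGetD_writeSeq_at cq0 1 L1 j hj (by omega)
        (by rw [hcq0len]; push_cast at hfit ⊢; omega)])
    (fun x hx => ⟨(hL1bound x hx).1, (hpb x ((hL1mem x).1 hx).1).2,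
      Or.inl (hL1val x hx)⟩)
    hL1nodup]
  have hfilter : L1.filter (fun x => vget v1 x = 2) = L1 :=
    List.filter_eq_self.2 (fun x hx => by simp [hL1val x hx])
  rw [hfilter]
  rw [extra_eq conn v1 L1 (fun f hf c hc => by
    have hfb := hpb f ((hL1mem f).1 hf).1
    have := hconn' f hfb.1 hfb.2 c hc
    exact ⟨this.1, by omega⟩)]
  -- pure counting
  set A := (nbr conn p).toFinset with hA
  set B := A.biUnion (fun f => (nbr conn f).toFinset) with hB
  have hfresh : ∀ x, 0 ≤ x → (vget v1 x = 0 ↔ x ≠ p ∧ x ∉ nbr conn p) := by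
    intro x hx
    by_cases hmem : x ∈ L1
    · rw [hL1val x hmem]
      have := (hL1mem x).1 hmem
      constructor
      · intro h; omega
      · intro h; exact absurd this.1 h.2
    · rw [hv1def, vget_markAll_of_not_mem 2 v0 L1 x hx hmem
        (fun c hc => (hL1bound c hc).1)]
      rw [hv0 x hx]
      by_cases hxp : x = p
      · simp [hxp]
      · rw [if_neg hxp]
        constructor
        · intro _
          refine ⟨hxp, fun hnb => hmem ((hL1mem x).2 ⟨hnb, hxp⟩)⟩
        · intro _; rfl
  have hL1F : L1.toFinset = A.erase p := by
    ext x
    simp only [List.mem_toFinset, hL1mem, Finset.mem_erase, hA, List.mem_toFinset]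
    tauto
  have hlenL1 : L1.length = (A.erase p).card := by
    rw [← hL1F, List.toFinset_card_of_nodup hL1nodup]
  have hstep1 : (L1.toFinset.biUnion (fun f => (nbr conn f).toFinset)).filter
        (fun x => vget v1 x = 0)
      = B.filter (fun x => x ≠ p ∧ x ∉ A) := by
    rw [hL1F]
    ext x
    simp only [Finset.mem_filter, Finset.mem_biUnion, Finset.mem_erase, hB, hA,
      List.mem_toFinset]
    constructor
    · rintro ⟨⟨f, ⟨hfp, hfA⟩, hxf⟩, hx0⟩
      have hfb := hpb f hfA
      have hxb := hconn' f hfb.1 hfb.2 x hxf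
      have := (hfresh x hxb.1).1 hx0
      exact ⟨⟨f, hfA, hxf⟩, this⟩
    · rintro ⟨⟨f, hfA, hxf⟩, hxp, hxA⟩
      have hfb := hpb f hfA
      have hxb := hconn' f hfb.1 hfb.2 x hxf
      refine ⟨⟨f, ⟨?_, hfA⟩, hxf⟩, (hfresh x hxb.1).2 ⟨hxp, hxA⟩⟩
      rintro rfl
      exact hxA hxf
  rw [hstep1]
  have hdecomp : (A ∪ B).erase p
      = (A.erase p) ∪ B.filter (fun x => x ≠ p ∧ x ∉ A) := by
    ext x
    simp only [Finset.mem_erase, Finset.mem_union, Finset.mem_filter]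
    tauto
  have hdisj : Disjoint (A.erase p) (B.filter (fun x => x ≠ p ∧ x ∉ A)) := by
    rw [Finset.disjoint_left]
    intro a ha hb
    rw [Finset.mem_erase] at ha
    rw [Finset.mem_filter] at hb
    exact hb.2.2 ha.2
  show (0:ℤ) + L1.length + _ = _
  rw [show reachSet conn p = (A ∪ B).erase p from rfl, hdecomp,
    Finset.card_union_of_disjoint hdisj, hlenL1]
  push_cast
  ring

theorem pre_to_hconn (conn : List (List Int)) (N : Int)
    (hlen : N ≤ conn.length)
    (hvals : ∀ l ∈ conn.take N.toNat, ∀ c ∈ l, 0 ≤ c ∧ c < N) :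
    ∀ x : Int, 0 ≤ x → x < N → ∀ c ∈ nbr conn x, 0 ≤ c ∧ c < N := by
  intro x hx hxN c hc
  have hxlt : x.toNat < conn.length := by omega
  have hnbr : nbr conn x = conn[x.toNat] := by
    show PySem.List.pyGetD conn x [] = _
    conv_lhs => rw [show x = ((x.toNat:ℕ):ℤ) by omega]
    rw [PySem.List.pyGetD_natCast]
    simp [List.getD, List.getElem?_eq_getElem hxlt]
  rw [hnbr] at hc
  apply hvals conn[x.toNat] ?_ c hc
  have h1 : x.toNat < N.toNat := by omega
  have h2 : (conn.take N.toNat)[x.toNat]'(by simp; omega) = conn[x.toNat] :=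
    List.getElem_take ..
  rw [← h2]
  exact List.getElem_mem _

theorem main_eq (conn : List (List Int)) (N : Int)
    (hlen : N ≤ conn.length)
    (hvals : ∀ l ∈ conn.take N.toNat, ∀ c ∈ l, 0 ≤ c ∧ c < N) :
    bfs conn N = bfs_alt conn N := by
  unfold bfs bfs_alt
  apply PySem.List.foldl_congr_mem
  intro acc p hpmem
  obtain ⟨hp0, hpN⟩ := PySem.List.mem_pyRange_one.1 hpmem
  have hA := personA conn N (pre_to_hconn conn N hlen hvals) p hp0 hpN
  have hB := personB conn p
  dsimp only
  rw [hA, hB]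

-- ===== VERDICT (by name: the statement is the Claim_ definition above) =====
theorem bfs_spec : Claim_equal_bfs := by
  intro connections N _hdom hpre
  unfold Spec_bfs
  exact main_eq connections N hpre.1 hpre.2
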